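-- pv_equiv track=rewrite | github.com/MacThanhD21/CodePTIT | Python/PY01043.py | list_numbers
-- ===== SOURCE A (Python) =====
-- def is_palindrome(num):
--     return str(num) == str(num)[::-1]
--
-- def all_even_digits(num):
--     return all(int(digit) % 2 == 0 for digit in str(num))
--
-- def list_numbers(N):
--     results = []
--     start = 22 if N > 22 else N
--     if start % 2 == 1:
--         start += 1
--     for i in range(start, N, 2):
--         if is_palindrome(i) and all_even_digits(i) and (len(str(i)) % 2 == 0):
--             results.append(i)
--     return results
-- ===== SOURCE B (Python) =====
-- def _mirror(h, k):
--     # h followed by its k digits reversed: h * 10**k + reverse(h)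
--     v = h
--     t = h
--     for _ in range(k):
--         v = v * 10 + t % 10
--         t //= 10
--     return v
--
-- def list_numbers(N):
--     # Generate even-length palindromes made of even digits directly, by
--     # mirroring every all-even-digit first half, in ascending order.
--     if N <= 22:
--         return []
--     k_max = len(str(N - 1)) // 2
--     results = []
--     halves = [2, 4, 6, 8]
--     for k in range(1, k_max + 1):
--         for h in halves:
--             v = _mirror(h, k)
--             if v < N:
--                 results.append(v)
--         halves = [10 * h + d for h in halves for d in (0, 2, 4, 6, 8)]
--     return results
-- ===== Notes on version B (the rewrite author's own statement) =====
-- stated objective: faster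
-- what changed: Instead of scanning every even number below N and string-testing each for palindromicity, B generates exactly the even-length all-even-digit palindromes by mirroring every all-even-digit first half in ascending order and keeping those below N.
import Mathlib
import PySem

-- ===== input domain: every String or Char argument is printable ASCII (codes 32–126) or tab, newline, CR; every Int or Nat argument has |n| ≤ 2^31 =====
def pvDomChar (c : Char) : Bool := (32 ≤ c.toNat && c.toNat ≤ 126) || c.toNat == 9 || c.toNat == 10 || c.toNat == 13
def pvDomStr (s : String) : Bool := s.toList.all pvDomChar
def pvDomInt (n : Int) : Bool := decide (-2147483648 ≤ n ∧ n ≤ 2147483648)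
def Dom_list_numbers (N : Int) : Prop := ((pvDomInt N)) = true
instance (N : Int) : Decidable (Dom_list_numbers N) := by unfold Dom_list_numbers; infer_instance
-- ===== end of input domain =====

-- B generates the even-length all-even-digit palindromes below N directly, by mirroring
-- every all-even-digit first half in ascending order, instead of scanning all evens below N.


-- ===== PORT A =====
-- str(num) == str(num)[::-1]; the slice step is -1 ≠ 0, so slice? never raises (the getD default is unreachable)
def pvIsPalindrome (num : Int) : Bool :=
  PySem.Int.toStr num == (PySem.Str.slice? (PySem.Int.toStr num) none none (-1)).getD (PySem.Int.toStr num)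

-- all(int(digit) % 2 == 0 for digit in str(num)); every character of str(num) reached here is a
-- decimal digit, so int(digit) never raises (the getD default is unreachable)
def pvAllEvenDigits (num : Int) : Bool :=
  (PySem.Int.toChars num).all fun c => PySem.Int.mod ((PySem.Int.ofChars? [c]).getD 0) 2 == 0

def list_numbers (N : Int) : List Int :=
  let start := if 22 < N then 22 else N
  let start := if PySem.Int.mod start 2 == 1 then start + 1 else start
  (PySem.List.pyRange start N 2).foldl
    (fun results i =>
      if pvIsPalindrome i && pvAllEvenDigits i
          && (PySem.Int.mod (PySem.Str.len (PySem.Int.toStr i)) 2 == 0)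
      then results ++ [i] else results) []

-- ===== PORT B =====
-- _mirror(h, k): v = h; t = h; k times: v = v*10 + t%10; t //= 10
def pvMirror (h k : Int) : Int :=
  ((PySem.List.pyRange 0 k 1).foldl
    (fun (vt : Int × Int) _ => (vt.1 * 10 + PySem.Int.mod vt.2 10, PySem.Int.floordiv vt.2 10))
    (h, h)).1

def list_numbers_alt (N : Int) : List Int :=
  if N ≤ 22 then []
  else
    let kmax := PySem.Int.floordiv (PySem.Str.len (PySem.Int.toStr (N - 1))) 2
    ((PySem.List.pyRange 1 (kmax + 1) 1).foldl
      (fun (st : List Int × List Int) k =>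
        (st.2.foldl (fun res h =>
            let v := pvMirror h k
            if v < N then res ++ [v] else res) st.1,
         st.2.flatMap fun h => [(0 : Int), 2, 4, 6, 8].map fun d => 10 * h + d))
      ([], [2, 4, 6, 8])).1

-- ===== PRECONDITION & SPEC =====
def Spec_list_numbers (N : Int) (out : List Int) : Prop := out = list_numbers_alt N
instance (N : Int) (out : List Int) : Decidable (Spec_list_numbers N out) := by unfold Spec_list_numbers; infer_instance

-- ===== CLAIM (what is proved, stated in full; the proofs are below) =====
def Claim_equal_list_numbers : Prop := ∀ (N : Int), Dom_list_numbers N → Spec_list_numbers N (list_numbers N)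

-- ===== LEMMAS AND PROOFS =====

-- The condition of A's loop, as one Bool.
def pvPred (i : Int) : Bool :=
  pvIsPalindrome i && pvAllEvenDigits i
    && (PySem.Int.mod (PySem.Str.len (PySem.Int.toStr i)) 2 == 0)

-- halves after j generator steps (all-even-digit numbers with exactly j+1 digits, ascending)
def halvesL : Nat → List Int
  | 0 => [2, 4, 6, 8]
  | j + 1 => (halvesL j).flatMap fun h => [(0 : Int), 2, 4, 6, 8].map fun d => 10 * h + d

-- all candidate palindromes with at most 10 digits, ascending
def pvPals : List Int :=
  (List.range 5).flatMap fun j => (halvesL j).map fun h => pvMirror h ((j : Int) + 1)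

-- canonical result
def pvCanon (N : Int) : List Int :=
  (List.range 5).flatMap fun j =>
    ((halvesL j).map fun h => pvMirror h ((j : Int) + 1)).filter (· < N)

-- ---- generic folds ----
theorem foldl_ignore {α β : Type} (g : β → β) (s : β) (l : List α) :
    l.foldl (fun s _ => g s) s = g^[l.length] s := by
  induction l generalizing s with
  | nil => rfl
  | cons a l ih => simp [List.foldl_cons, ih, Function.iterate_succ_apply]

theorem foldl_append_filter (N : Int) (k : Int) (l : List Int) (acc : List Int) :
    l.foldl (fun res h =>
      let v := pvMirror h k
      if v < N then res ++ [v] else res) acc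
    = acc ++ (l.map fun h => pvMirror h k).filter (· < N) := by
  induction l generalizing acc with
  | nil => simp
  | cons a l ih =>
      simp only [List.foldl_cons, List.map_cons, List.filter_cons]
      by_cases h : pvMirror a k < N <;> simp [h, ih, List.append_assoc]

theorem flatMap_range_extend (f : Nat → List Int) (a : Nat) :
    ∀ b, a ≤ b → (∀ j, a ≤ j → f j = []) → (List.range b).flatMap f = (List.range a).flatMap f := by
  intro b
  induction b with
  | zero =>
      intro h hf
      have ha : a = 0 := Nat.le_zero.mp h
      subst ha
      rfl
  | succ b ih =>
      intro hab hf
      by_cases hab' : a = b + 1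
      · rw [hab']
      · have hb : a ≤ b := by omega
        rw [List.range_succ, List.flatMap_append, ih hb hf]
        simp [hf b hb]

-- ---- str(n) and Nat.digits ----
theorem toDigitsCore_eq (f : Nat) : ∀ (n : Nat) (l : List Char), n < f → 0 < n →
    Nat.toDigitsCore 10 f n l = ((Nat.digits 10 n).map Nat.digitChar).reverse ++ l := by
  induction f with
  | zero => intro n l h1 h2; omega
  | succ f ih =>
      intro n l h1 h2
      rw [Nat.toDigitsCore]
      rw [Nat.digits_def' (by norm_num : (1:ℕ) < 10) h2]
      by_cases h0 : n / 10 = 0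
      · simp [h0]
      · rw [if_neg h0, ih (n / 10) _ (by omega) (Nat.pos_of_ne_zero h0)]
        simp

theorem toChars_eq (n : Int) (hn : 0 < n) :
    PySem.Int.toChars n = ((Nat.digits 10 n.toNat).map Nat.digitChar).reverse := by
  have h1 : ¬ n < 0 := by omega
  simp only [PySem.Int.toChars, if_neg h1]
  rw [Nat.toDigits, toDigitsCore_eq (n.toNat + 1) n.toNat [] (by omega) (by omega), List.append_nil]

-- ---- digit characters ----
theorem digitChar_decode_all : ∀ d : Nat, d < 10 → (Nat.digitChar d).toNat - 48 = d := by decide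

theorem map_decode (m : List Nat) (hm : ∀ d ∈ m, d < 10) :
    (m.map Nat.digitChar).map (fun c => c.toNat - 48) = m := by
  rw [List.map_map]
  conv_rhs => rw [← List.map_id m]
  exact List.map_congr_left fun a ha => digitChar_decode_all a (hm a ha)

theorem digitChar_inj (l : List Nat) (hl : ∀ d ∈ l, d < 10)
    (h : l.map Nat.digitChar = (l.map Nat.digitChar).reverse) : l = l.reverse := by
  have h2 := congrArg (List.map (fun c => c.toNat - 48)) h
  rw [map_decode l hl, ← List.map_reverse,
      map_decode l.reverse (fun d hd => hl d (List.mem_reverse.mp hd))] at h2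
  exact h2

-- ---- the three tests, on digits ----
theorem palindrome_iff (n : Int) (hn : 0 < n) :
    pvIsPalindrome n = true ↔ Nat.digits 10 n.toNat = (Nat.digits 10 n.toNat).reverse := by
  unfold pvIsPalindrome
  rw [PySem.Str.slice?_none_none_neg_one, Option.getD_some, beq_iff_eq]
  constructor
  · intro h
    have h2 := congrArg String.toList h
    rw [String.toList_ofList, PySem.Int.toList_toStr, toChars_eq n hn, List.reverse_reverse] at h2
    exact digitChar_inj _ (fun d hd => Nat.digits_lt_base (by norm_num) hd) h2.symm
  · intro h
    have h2 : (PySem.Int.toStr n).toList.reverse = (PySem.Int.toStr n).toList := by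
      rw [PySem.Int.toList_toStr, toChars_eq n hn, List.reverse_reverse, ← List.map_reverse]
      exact congrArg (List.map Nat.digitChar) h
    rw [h2, String.ofList_toList]

theorem allEven_iff (n : Int) (hn : 0 < n) :
    pvAllEvenDigits n = true ↔ ∀ d ∈ Nat.digits 10 n.toNat, d % 2 = 0 := by
  have key : ∀ d : Nat, d < 10 →
      ((PySem.Int.mod ((PySem.Int.ofChars? [Nat.digitChar d]).getD 0) 2 == 0) = true ↔ d % 2 = 0) := by
    decide
  unfold pvAllEvenDigits
  rw [toChars_eq n hn, List.all_eq_true]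
  constructor
  · intro h d hd
    exact (key d (Nat.digits_lt_base (by norm_num) hd)).mp
      (h _ (List.mem_reverse.mpr (List.mem_map_of_mem hd)))
  · intro h c hc
    rw [List.mem_reverse, List.mem_map] at hc
    obtain ⟨d, hd, rfl⟩ := hc
    exact (key d (Nat.digits_lt_base (by norm_num) hd)).mpr (h d hd)

theorem lenEven_iff (n : Int) (hn : 0 < n) :
    (PySem.Int.mod (PySem.Str.len (PySem.Int.toStr n)) 2 == 0) = true
      ↔ (Nat.digits 10 n.toNat).length % 2 = 0 := by
  rw [PySem.Str.len_eq, PySem.Int.toList_toStr, toChars_eq n hn]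
  simp only [List.length_reverse, List.length_map]
  rw [show (2:Int) = ((2:Nat):Int) from rfl, PySem.Int.mod_natCast]
  simp only [beq_iff_eq]
  omega

-- ---- the mirror loop ----
theorem mirror_iterate : ∀ (ds : List Nat), (∀ d ∈ ds, d < 10) → ∀ v : Int,
    (fun (vt : Int × Int) => (vt.1 * 10 + PySem.Int.mod vt.2 10, PySem.Int.floordiv vt.2 10))^[ds.length]
      (v, ((Nat.ofDigits 10 ds : Nat) : Int))
    = (v * 10 ^ ds.length + ((Nat.ofDigits 10 ds.reverse : Nat) : Int), 0) := by
  intro ds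
  induction ds with
  | nil => intro _ v; simp [Nat.ofDigits_nil]
  | cons d ds ih =>
      intro hds v
      have hd : d < 10 := hds d (by simp)
      have hds' : ∀ x ∈ ds, x < 10 := fun x hx => hds x (by simp [hx])
      have h1 : (Nat.ofDigits 10 (d :: ds) : Nat) = d + 10 * Nat.ofDigits 10 ds :=
        Nat.ofDigits_cons
      have hmod : PySem.Int.mod ((v, ((Nat.ofDigits 10 (d :: ds) : Nat) : Int)) : Int × Int).2 10
          = (d : Int) := by
        show PySem.Int.mod ((Nat.ofDigits 10 (d :: ds) : Nat) : Int) 10 = (d : Int)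
        have hm := PySem.Int.mod_natCast (Nat.ofDigits 10 (d :: ds)) 10
        rw [show (Nat.ofDigits 10 (d :: ds)) % 10 = d by rw [h1]; omega] at hm
        exact_mod_cast hm
      have hdiv : PySem.Int.floordiv ((v, ((Nat.ofDigits 10 (d :: ds) : Nat) : Int)) : Int × Int).2 10
          = ((Nat.ofDigits 10 ds : Nat) : Int) := by
        show PySem.Int.floordiv ((Nat.ofDigits 10 (d :: ds) : Nat) : Int) 10
          = ((Nat.ofDigits 10 ds : Nat) : Int)
        have hf := PySem.Int.floordiv_natCast (Nat.ofDigits 10 (d :: ds)) 10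
        rw [show (Nat.ofDigits 10 (d :: ds)) / 10 = Nat.ofDigits 10 ds by rw [h1]; omega] at hf
        exact_mod_cast hf
      have hfst : ((v, ((Nat.ofDigits 10 (d :: ds) : Nat) : Int)) : Int × Int).1 = v := rfl
      rw [List.length_cons, Function.iterate_succ_apply, hmod, hdiv, hfst]
      rw [ih hds' (v * 10 + (d : Int)), List.reverse_cons]
      have h2 : (Nat.ofDigits 10 (ds.reverse ++ [d]) : Nat)
          = Nat.ofDigits 10 ds.reverse + 10 ^ ds.length * d := by
        rw [Nat.ofDigits_append, List.length_reverse, Nat.ofDigits_singleton]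
      rw [h2]
      simp only [Prod.mk.injEq]
      constructor
      · push_cast
        ring
      · trivial

theorem mirror_eq (h : Int) (k : Nat) (hh : 0 < h)
    (hk : (Nat.digits 10 h.toNat).length = k) :
    pvMirror h (k : Int)
      = ((Nat.ofDigits 10 ((Nat.digits 10 h.toNat).reverse ++ Nat.digits 10 h.toNat) : Nat) : Int) := by
  unfold pvMirror
  rw [foldl_ignore (fun vt : Int × Int =>
        (vt.1 * 10 + PySem.Int.mod vt.2 10, PySem.Int.floordiv vt.2 10)) ((h, h) : Int × Int)
      (PySem.List.pyRange 0 (k : Int) 1)]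
  have hlen : (PySem.List.pyRange 0 (k : Int) 1).length = k := by
    rw [PySem.List.length_pyRange_one]; omega
  rw [hlen]
  have hds : ∀ d ∈ Nat.digits 10 h.toNat, d < 10 := fun d hd => Nat.digits_lt_base (by norm_num) hd
  have hstart : ((h, h) : Int × Int) = (h, ((Nat.ofDigits 10 (Nat.digits 10 h.toNat) : Nat) : Int)) := by
    rw [Nat.ofDigits_digits, Int.toNat_of_nonneg hh.le]
  rw [hstart, ← hk, mirror_iterate _ hds h]
  have h2 : (Nat.ofDigits 10 ((Nat.digits 10 h.toNat).reverse ++ Nat.digits 10 h.toNat) : Nat)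
      = Nat.ofDigits 10 (Nat.digits 10 h.toNat).reverse
        + 10 ^ (Nat.digits 10 h.toNat).length * h.toNat := by
    rw [Nat.ofDigits_append, List.length_reverse, Nat.ofDigits_digits]
  rw [h2]
  push_cast [Int.toNat_of_nonneg hh.le]
  ring

-- ---- halves characterization ----
theorem digits_single (d : Nat) (h1 : 0 < d) (h2 : d < 10) : Nat.digits 10 d = [d] := by
  rw [Nat.digits_def' (by norm_num : (1:ℕ) < 10) h1, Nat.mod_eq_of_lt h2, Nat.div_eq_of_lt h2,
      Nat.digits_zero]

theorem halvesL_mem (j : Nat) (h : Int) :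
    h ∈ halvesL j ↔ 0 < h ∧ (Nat.digits 10 h.toNat).length = j + 1 ∧
      ∀ d ∈ Nat.digits 10 h.toNat, d % 2 = 0 := by
  induction j generalizing h with
  | zero =>
      constructor
      · intro hm
        have hcases : h = 2 ∨ h = 4 ∨ h = 6 ∨ h = 8 := by simpa [halvesL] using hm
        have key : ∀ d : Nat, 0 < d → d < 10 → d % 2 = 0 →
            (0 < ((d:Int)) ∧ (Nat.digits 10 ((d:Int)).toNat).length = 1 ∧
              ∀ x ∈ Nat.digits 10 ((d:Int)).toNat, x % 2 = 0) := by
          intro d h1 h2 h3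
          rw [Int.toNat_natCast, digits_single d h1 h2]
          refine ⟨by exact_mod_cast h1, rfl, ?_⟩
          intro x hx
          simp only [List.mem_singleton] at hx
          omega
        rcases hcases with rfl | rfl | rfl | rfl
        · exact_mod_cast key 2 (by norm_num) (by norm_num) (by norm_num)
        · exact_mod_cast key 4 (by norm_num) (by norm_num) (by norm_num)
        · exact_mod_cast key 6 (by norm_num) (by norm_num) (by norm_num)
        · exact_mod_cast key 8 (by norm_num) (by norm_num) (by norm_num)
      · rintro ⟨h1, h2, h3⟩
        obtain ⟨d, hd⟩ := List.length_eq_one_iff.mp h2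
        have hval : d = h.toNat := by
          have hh := Nat.ofDigits_digits 10 h.toNat
          rw [hd, Nat.ofDigits_singleton] at hh
          exact hh
        have hlt : d < 10 := Nat.digits_lt_base (by norm_num) (by rw [hd]; simp)
        have hev : d % 2 = 0 := h3 d (by rw [hd]; simp)
        have hcast : h = (d : Int) := by omega
        have hcases : d = 2 ∨ d = 4 ∨ d = 6 ∨ d = 8 := by omega
        rcases hcases with rfl | rfl | rfl | rfl <;> rw [hcast] <;> simp [halvesL]
  | succ j ih =>
      constructor
      · intro hm
        simp only [halvesL, List.mem_flatMap, List.mem_map, List.mem_cons,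
          List.not_mem_nil, or_false] at hm
        obtain ⟨a, ha, d, hd, rfl⟩ := hm
        obtain ⟨h1, h2, h3⟩ := (ih a).mp ha
        have hdb : 0 ≤ d ∧ d < 10 ∧ d.toNat % 2 = 0 := by
          rcases hd with rfl | rfl | rfl | rfl | rfl <;> decide
        have hpos : (0:Int) < 10 * a + d := by omega
        have hn : (10 * a + d).toNat = 10 * a.toNat + d.toNat := by omega
        have hdig : Nat.digits 10 ((10 * a + d).toNat) = d.toNat :: Nat.digits 10 a.toNat := by
          rw [Nat.digits_def' (by norm_num : (1:ℕ) < 10) (by omega)]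
          rw [show (10 * a + d).toNat % 10 = d.toNat by omega,
              show (10 * a + d).toNat / 10 = a.toNat by omega]
        refine ⟨hpos, by rw [hdig]; simp [h2], ?_⟩
        intro x hx
        rw [hdig] at hx
        rcases List.mem_cons.mp hx with rfl | hx
        · exact hdb.2.2
        · exact h3 x hx
      · rintro ⟨h1, h2, h3⟩
        have hpos : 0 < h.toNat := by omega
        have hdig := Nat.digits_def' (by norm_num : (1:ℕ) < 10) hpos
        have hlen : (Nat.digits 10 (h.toNat / 10)).length = j + 1 := by
          rw [hdig] at h2; simpa using h2
        have hq : 0 < h.toNat / 10 := by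
          rcases Nat.eq_zero_or_pos (h.toNat / 10) with h0 | h0
          · rw [h0] at hlen; simp at hlen
          · exact h0
        have ha := (ih ((h.toNat / 10 : Nat) : Int)).mpr
          ⟨by exact_mod_cast hq, by rw [Int.toNat_natCast]; exact hlen,
           by rw [Int.toNat_natCast]; intro x hx; exact h3 x (by rw [hdig]; exact List.mem_cons_of_mem _ hx)⟩
        have hd : h.toNat % 10 % 2 = 0 := h3 _ (by rw [hdig]; simp)
        have hdlt : h.toNat % 10 < 10 := by omega
        simp only [halvesL, List.mem_flatMap, List.mem_map]
        refine ⟨((h.toNat / 10 : Nat) : Int), ha, ((h.toNat % 10 : Nat) : Int), ?_, ?_⟩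
        · have hcases : h.toNat % 10 = 0 ∨ h.toNat % 10 = 2 ∨ h.toNat % 10 = 4 ∨
              h.toNat % 10 = 6 ∨ h.toNat % 10 = 8 := by omega
          rcases hcases with hc | hc | hc | hc | hc <;> rw [hc] <;> norm_num
        · omega

theorem halvesL_pairwise (j : Nat) : (halvesL j).Pairwise (· < ·) := by
  induction j with
  | zero => decide
  | succ j ih =>
      simp only [halvesL]
      rw [List.pairwise_flatMap]
      constructor
      · intro a _
        rw [List.pairwise_map]
        simp only [List.pairwise_cons, List.mem_cons]
        norm_num
      · refine ih.imp ?_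
        intro a b hab x hx y hy
        simp only [List.mem_map, List.mem_cons, List.not_mem_nil, or_false] at hx hy
        obtain ⟨d1, hd1, rfl⟩ := hx
        obtain ⟨d2, hd2, rfl⟩ := hy
        have hb1 : 0 ≤ d1 ∧ d1 ≤ 8 := by rcases hd1 with rfl|rfl|rfl|rfl|rfl <;> norm_num
        have hb2 : 0 ≤ d2 ∧ d2 ≤ 8 := by rcases hd2 with rfl|rfl|rfl|rfl|rfl <;> norm_num
        omega

-- ---- palindromes: digits, bounds, order ----
theorem pal_digits {j : Nat} {h : Int} (hh : h ∈ halvesL j) :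
    ∃ n : Nat, pvMirror h ((j : Int) + 1) = (n : Int) ∧
      Nat.digits 10 n = (Nat.digits 10 h.toNat).reverse ++ Nat.digits 10 h.toNat ∧
      (Nat.digits 10 h.toNat).length = j + 1 := by
  obtain ⟨hpos, hlen, _⟩ := (halvesL_mem j h).mp hh
  refine ⟨Nat.ofDigits 10 ((Nat.digits 10 h.toNat).reverse ++ Nat.digits 10 h.toNat), ?_, ?_, hlen⟩
  · have hme := mirror_eq h (j + 1) hpos hlen
    rw [show ((j:Int) + 1) = (((j + 1 : Nat)) : Int) by push_cast; ring]
    exact hme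
  · apply Nat.digits_ofDigits 10 (by norm_num)
    · intro d hd
      rcases List.mem_append.mp hd with hd | hd
      · exact Nat.digits_lt_base (by norm_num) (List.mem_reverse.mp hd)
      · exact Nat.digits_lt_base (by norm_num) hd
    · intro hne
      have hds_ne : Nat.digits 10 h.toNat ≠ [] := Nat.digits_ne_nil_iff_ne_zero.mpr (by omega)
      rw [List.getLast_append, dif_neg (by simpa using hds_ne)]
      exact Nat.getLast_digit_ne_zero 10 (by omega)

theorem pals_mem_bounds {j : Nat} {x : Int}
    (hx : x ∈ (halvesL j).map fun h => pvMirror h ((j : Int) + 1)) :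
    ((10 ^ (2 * j + 1) : Nat) : Int) ≤ x ∧ x < ((10 ^ (2 * j + 2) : Nat) : Int) := by
  rw [List.mem_map] at hx
  obtain ⟨h, hh, rfl⟩ := hx
  obtain ⟨n, hn, hdig, hlen⟩ := pal_digits hh
  rw [hn]
  have hlen2 : (Nat.digits 10 n).length = 2 * j + 2 := by
    rw [hdig, List.length_append, List.length_reverse, hlen]; omega
  have hne : n ≠ 0 := by
    intro h0
    rw [h0, Nat.digits_zero] at hdig
    have := congrArg List.length hdig
    rw [List.length_append, List.length_reverse, hlen] at this
    simp at this
  have hub : n < 10 ^ (2 * j + 2) := by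
    have := Nat.lt_base_pow_length_digits (b := 10) (m := n) (by norm_num)
    rwa [hlen2] at this
  have hlb : 10 ^ (2 * j + 2) ≤ 10 * n := by
    have := Nat.base_pow_length_digits_le 10 n (by norm_num) hne
    rwa [hlen2] at this
  constructor
  · have hp : 10 ^ (2 * j + 1) * 10 ≤ 10 * n := by
      rw [← pow_succ]; exact hlb
    have : 10 ^ (2 * j + 1) ≤ n := by omega
    exact_mod_cast this
  · exact_mod_cast hub

theorem mirror_mono {j : Nat} {a b : Int} (ha : a ∈ halvesL j) (hb : b ∈ halvesL j)
    (hab : a < b) : pvMirror a ((j:Int) + 1) < pvMirror b ((j:Int) + 1) := by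
  obtain ⟨hpa, hla, _⟩ := (halvesL_mem j a).mp ha
  obtain ⟨hpb, hlb, _⟩ := (halvesL_mem j b).mp hb
  obtain ⟨n1, e1, d1, l1⟩ := pal_digits ha
  obtain ⟨n2, e2, d2, l2⟩ := pal_digits hb
  rw [e1, e2]
  have hv1 : n1 = Nat.ofDigits 10 (Nat.digits 10 a.toNat).reverse + 10 ^ (j + 1) * a.toNat := by
    have h1 := Nat.ofDigits_digits 10 n1
    rw [d1, Nat.ofDigits_append, List.length_reverse, Nat.ofDigits_digits, l1] at h1
    omega
  have hv2 : n2 = Nat.ofDigits 10 (Nat.digits 10 b.toNat).reverse + 10 ^ (j + 1) * b.toNat := by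
    have h1 := Nat.ofDigits_digits 10 n2
    rw [d2, Nat.ofDigits_append, List.length_reverse, Nat.ofDigits_digits, l2] at h1
    omega
  have hr1 : Nat.ofDigits 10 (Nat.digits 10 a.toNat).reverse < 10 ^ (j + 1) := by
    have := Nat.ofDigits_lt_base_pow_length (b := 10)
      (l := (Nat.digits 10 a.toNat).reverse) (by norm_num)
      (fun x hx => Nat.digits_lt_base (by norm_num) (List.mem_reverse.mp hx))
    rwa [List.length_reverse, l1] at this
  have hab' : a.toNat < b.toNat := by omega
  have : n1 < n2 := by
    calc n1 < 10 ^ (j + 1) * (a.toNat + 1) := by rw [hv1]; nlinarith [hr1]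
    _ ≤ 10 ^ (j + 1) * b.toNat := Nat.mul_le_mul_left _ (by omega)
    _ ≤ n2 := by omega
  exact_mod_cast this

theorem pals_pairwise : pvPals.Pairwise (· < ·) := by
  unfold pvPals
  rw [List.pairwise_flatMap]
  constructor
  · intro j _
    rw [List.pairwise_map]
    exact List.Pairwise.imp_of_mem (fun {a b} ha hb hab => mirror_mono ha hb hab)
      (halvesL_pairwise j)
  · refine List.pairwise_lt_range.imp ?_
    intro j1 j2 hj x hx y hy
    have b1 := (pals_mem_bounds hx).2
    have b2 := (pals_mem_bounds hy).1
    have hp : (10:Nat) ^ (2 * j1 + 2) ≤ 10 ^ (2 * j2 + 1) :=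
      Nat.pow_le_pow_right (by norm_num) (by omega)
    have hp' : ((10 ^ (2 * j1 + 2) : Nat) : Int) ≤ ((10 ^ (2 * j2 + 1) : Nat) : Int) := by
      exact_mod_cast hp
    omega

-- ---- the main characterization ----
theorem main_fwd {x : Int} (hx : x ∈ pvPals) :
    22 ≤ x ∧ (2:Int) ∣ x - 22 ∧ pvPred x = true := by
  unfold pvPals at hx
  rw [List.mem_flatMap] at hx
  obtain ⟨j, _, hx⟩ := hx
  have hbounds := pals_mem_bounds hx
  rw [List.mem_map] at hx
  obtain ⟨h, hh, rfl⟩ := hx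
  obtain ⟨_, _, hev⟩ := (halvesL_mem j h).mp hh
  obtain ⟨n, hn, hdig, hlen⟩ := pal_digits hh
  rw [hn] at hbounds ⊢
  have h10 : 10 ≤ n := by
    have h1 : (10:Nat) ^ 1 ≤ 10 ^ (2 * j + 1) := Nat.pow_le_pow_right (by norm_num) (by omega)
    have h2 : ((10 ^ (2 * j + 1) : Nat) : Int) ≤ (n : Int) := hbounds.1
    have h3 : (10:Nat) ^ (2 * j + 1) ≤ n := by exact_mod_cast h2
    calc (10:Nat) = 10 ^ 1 := (pow_one 10).symm
    _ ≤ 10 ^ (2 * j + 1) := h1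
    _ ≤ n := h3
  have heven_all : ∀ d ∈ Nat.digits 10 n, d % 2 = 0 := by
    intro d hd
    rw [hdig] at hd
    rcases List.mem_append.mp hd with hd | hd
    · exact hev d (List.mem_reverse.mp hd)
    · exact hev d hd
  have hpal : Nat.digits 10 n = (Nat.digits 10 n).reverse := by
    rw [hdig, List.reverse_append, List.reverse_reverse]
  have hlen_even : (Nat.digits 10 n).length % 2 = 0 := by
    rw [hdig, List.length_append, List.length_reverse, hlen]; omega
  have hd0 : n % 10 % 2 = 0 :=
    heven_all _ (by rw [Nat.digits_def' (by norm_num : (1:ℕ) < 10) (by omega)]; exact List.mem_cons_self)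
  have hne' : Nat.digits 10 n ≠ [] := Nat.digits_ne_nil_iff_ne_zero.mpr (by omega)
  have hd0ne : n % 10 ≠ 0 := by
    intro h0
    have h2 : (Nat.digits 10 n).head? = some (n % 10) := by
      rw [Nat.digits_def' (by norm_num : (1:ℕ) < 10) (by omega : 0 < n)]
      rfl
    have hh1 : (Nat.digits 10 n).head? = (Nat.digits 10 n).getLast? := by
      conv_lhs => rw [hpal]
      exact List.head?_reverse
    have hh2 : (Nat.digits 10 n).getLast? = some ((Nat.digits 10 n).getLast hne') :=
      List.getLast?_eq_some_getLast hne'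
    have hgl := Nat.getLast_digit_ne_zero 10 (show n ≠ 0 by omega)
    rw [hh1, hh2, h0] at h2
    exact hgl (Option.some.inj h2)
  have hd1 : n / 10 % 10 % 2 = 0 := by
    apply heven_all
    rw [Nat.digits_def' (by norm_num : (1:ℕ) < 10) (by omega : 0 < n),
        Nat.digits_def' (by norm_num : (1:ℕ) < 10) (by omega : 0 < n / 10)]
    exact List.mem_cons_of_mem _ List.mem_cons_self
  have h22 : 22 ≤ n := by omega
  have hpos : (0:Int) < (n : Int) := by exact_mod_cast (by omega : 0 < n)
  refine ⟨by exact_mod_cast h22, by omega, ?_⟩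
  unfold pvPred
  rw [Bool.and_eq_true, Bool.and_eq_true]
  refine ⟨⟨?_, ?_⟩, ?_⟩
  · rw [palindrome_iff _ hpos, Int.toNat_natCast]; exact hpal
  · rw [allEven_iff _ hpos, Int.toNat_natCast]; exact heven_all
  · rw [lenEven_iff _ hpos, Int.toNat_natCast]; exact hlen_even

theorem main_bwd {x : Int} (hx10 : x < 10000000000) (h22 : 22 ≤ x) (hpred : pvPred x = true) :
    x ∈ pvPals := by
  have hpos : (0:Int) < x := by omega
  have hxn : x = (x.toNat : Int) := by omega
  unfold pvPred at hpred
  rw [Bool.and_eq_true, Bool.and_eq_true] at hpred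
  obtain ⟨⟨hp, he⟩, hl⟩ := hpred
  rw [palindrome_iff _ hpos] at hp
  rw [allEven_iff _ hpos] at he
  rw [lenEven_iff _ hpos] at hl
  set n := x.toNat with hn
  set ds := Nat.digits 10 n with hds
  have hne : ds ≠ [] := Nat.digits_ne_nil_iff_ne_zero.mpr (by omega)
  have hlen10 : ds.length ≤ 10 := by
    by_contra hc
    have h1 : (10:Nat) ^ 11 ≤ 10 ^ ds.length := Nat.pow_le_pow_right (by norm_num) (by omega)
    have h2 := Nat.base_pow_length_digits_le 10 n (by norm_num) (by omega)
    have h3 : n < 10000000000 := by omega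
    have h4 : (10:Nat) ^ 11 = 100000000000 := by norm_num
    rw [← hds] at h2
    omega
  have hlpos : ds.length ≠ 0 := by simpa using hne
  set k := ds.length / 2 with hk
  have hlen2 : ds.length = 2 * k := by omega
  have hkpos : 1 ≤ k := by omega
  have hk5 : k ≤ 5 := by omega
  have hlh : (ds.take k).length = k := by rw [List.length_take]; omega
  have hhh : (ds.drop k).length = k := by rw [List.length_drop]; omega
  have hsplit : ds.take k ++ ds.drop k = ds := List.take_append_drop k ds
  have hpal2 : ds.take k ++ ds.drop k = (ds.drop k).reverse ++ (ds.take k).reverse := by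
    rw [hsplit]
    conv_lhs => rw [hp, ← hsplit, List.reverse_append]
  have hlow : ds.take k = (ds.drop k).reverse :=
    (List.append_inj hpal2 (by rw [hlh, List.length_reverse, hhh])).1
  have hhne : ds.drop k ≠ [] := by
    intro h0; rw [h0] at hhh; simp at hhh; omega
  have hhd : ∀ d ∈ ds.drop k, d < 10 := fun d hd =>
    Nat.digits_lt_base (by norm_num) (List.mem_of_mem_drop hd)
  have hdigh : Nat.digits 10 (Nat.ofDigits 10 (ds.drop k)) = ds.drop k := by
    apply Nat.digits_ofDigits 10 (by norm_num) _ hhd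
    intro h'
    rw [List.getLast_drop]
    exact Nat.getLast_digit_ne_zero 10 (by omega)
  have hofpos : Nat.ofDigits 10 (ds.drop k) ≠ 0 := by
    intro h0; rw [h0, Nat.digits_zero] at hdigh; exact hhne hdigh.symm
  have hmem : ((Nat.ofDigits 10 (ds.drop k) : Nat) : Int) ∈ halvesL (k - 1) := by
    rw [halvesL_mem]
    refine ⟨by exact_mod_cast Nat.pos_of_ne_zero hofpos, ?_, ?_⟩
    · rw [Int.toNat_natCast, hdigh, hhh]; omega
    · rw [Int.toNat_natCast, hdigh]
      intro d hd; exact he d (List.mem_of_mem_drop hd)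
  unfold pvPals
  rw [List.mem_flatMap]
  refine ⟨k - 1, by rw [List.mem_range]; omega, ?_⟩
  rw [List.mem_map]
  refine ⟨((Nat.ofDigits 10 (ds.drop k) : Nat) : Int), hmem, ?_⟩
  obtain ⟨n', e', d', _⟩ := pal_digits hmem
  rw [e', hxn]
  rw [Int.toNat_natCast, hdigh] at d'
  have hnn : n' = n := by
    have h1 := Nat.ofDigits_digits 10 n'
    rw [d', ← hlow, hsplit] at h1
    rw [← h1, hds, Nat.ofDigits_digits]
  rw [hnn]

-- ---- canonical list ----
theorem canon_eq_filter (N : Int) : pvCanon N = pvPals.filter (· < N) := by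
  unfold pvCanon pvPals
  rw [List.filter_flatMap]

theorem canon_nil {N : Int} (hN : N ≤ 22) : pvCanon N = [] := by
  rw [canon_eq_filter]
  apply List.filter_eq_nil_iff.mpr
  intro x hx
  have h22 := (main_fwd hx).1
  simp only [decide_eq_true_eq]
  omega

theorem pyRange2_pairwise (a b : Int) : (PySem.List.pyRange a b 2).Pairwise (· < ·) := by
  rw [PySem.List.pyRange_of_pos a b (by norm_num)]
  rw [List.pairwise_map]
  exact List.pairwise_lt_range.imp (by intro k1 k2 hk; omega)

-- ---- A-side ----
theorem listA_eq (N : Int) (hN : Dom_list_numbers N) : list_numbers N = pvCanon N := by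
  have hDom : N ≤ 2147483648 := by
    unfold Dom_list_numbers pvDomInt at hN
    exact (of_decide_eq_true hN).2
  by_cases h22 : 22 < N
  · simp only [list_numbers, if_pos h22]
    rw [if_neg (by decide : ¬ (PySem.Int.mod (22:Int) 2 == 1) = true)]
    show (PySem.List.pyRange 22 N 2).foldl
      (fun results i => if pvPred i = true then results ++ [id i] else results) [] = pvCanon N
    rw [PySem.List.foldl_append_if pvPred id _ [], List.map_id, List.nil_append]
    rw [canon_eq_filter]
    apply List.Perm.eq_of_pairwise (le := (· < ·)) (fun a b _ _ h1 h2 => absurd h2 (by omega))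
    · exact List.Pairwise.sublist List.filter_sublist (pyRange2_pairwise 22 N)
    · exact List.Pairwise.sublist List.filter_sublist pals_pairwise
    · have nd1 : (List.filter pvPred (PySem.List.pyRange 22 N 2)).Nodup :=
        (List.Pairwise.sublist List.filter_sublist (pyRange2_pairwise 22 N)).imp
          (fun h => ne_of_lt h)
      have nd2 : (pvPals.filter (· < N)).Nodup :=
        (List.Pairwise.sublist List.filter_sublist pals_pairwise).imp (fun h => ne_of_lt h)
      rw [List.perm_ext_iff_of_nodup nd1 nd2]
      intro x
      rw [List.mem_filter, List.mem_filter, PySem.List.mem_pyRange_iff_of_pos (by norm_num)]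
      simp only [decide_eq_true_eq]
      constructor
      · rintro ⟨⟨hx22, hxN, hdvd⟩, hpred⟩
        exact ⟨main_bwd (by omega) hx22 hpred, hxN⟩
      · rintro ⟨hmem, hlt⟩
        obtain ⟨ha, hb, hc⟩ := main_fwd hmem
        exact ⟨⟨ha, hlt, by omega⟩, hc⟩
  · rw [canon_nil (by omega)]
    simp only [list_numbers, if_neg h22]
    have hnil : ∀ s : Int, N ≤ s → PySem.List.pyRange s N 2 = [] := by
      intro s hs
      rw [PySem.List.pyRange_of_pos s N (by norm_num), if_neg (by omega)]
      simp
    by_cases hodd : (PySem.Int.mod N 2 == 1) = true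
    · rw [if_pos hodd, hnil (N + 1) (by omega)]
      rfl
    · rw [if_neg hodd, hnil N le_rfl]
      rfl

-- ---- B-side ----
theorem loop_inv (N : Int) (m : Nat) :
    (PySem.List.pyRange 1 ((m : Int) + 1) 1).foldl
      (fun (st : List Int × List Int) k =>
        (st.2.foldl (fun res h =>
            let v := pvMirror h k
            if v < N then res ++ [v] else res) st.1,
         st.2.flatMap fun h => [(0 : Int), 2, 4, 6, 8].map fun d => 10 * h + d))
      ([], [2, 4, 6, 8])
    = ((List.range m).flatMap
        (fun j => ((halvesL j).map fun h => pvMirror h ((j:Int) + 1)).filter (· < N)),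
       halvesL m) := by
  induction m with
  | zero =>
      rw [show ((0:Nat):Int) + 1 = 1 by norm_num, PySem.List.pyRange_one_eq_nil (by norm_num)]
      simp [halvesL]
  | succ m ih =>
      rw [show (((m+1:Nat)):Int) + 1 = ((m:Int) + 1) + 1 by push_cast; ring,
          PySem.List.pyRange_one_succ_right (by omega), List.foldl_append, ih]
      simp only [List.foldl_cons, List.foldl_nil]
      rw [foldl_append_filter N ((m:Int) + 1) (halvesL m)]
      rw [List.range_succ, List.flatMap_append]
      simp only [Prod.mk.injEq]
      constructor
      · simp
      · rfl

theorem listB_eq (N : Int) (hN : Dom_list_numbers N) : list_numbers_alt N = pvCanon N := by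
  have hDom : N ≤ 2147483648 := by
    unfold Dom_list_numbers pvDomInt at hN
    exact (of_decide_eq_true hN).2
  by_cases h22 : N ≤ 22
  · unfold list_numbers_alt
    rw [if_pos h22, canon_nil h22]
  · simp only [list_numbers_alt, if_neg (by omega : ¬ N ≤ 22)]
    have hpos : (0:Int) < N - 1 := by omega
    have hlen : PySem.Str.len (PySem.Int.toStr (N - 1))
        = (((Nat.digits 10 (N - 1).toNat).length : Nat) : Int) := by
      rw [PySem.Str.len_eq, PySem.Int.toList_toStr, toChars_eq _ hpos]
      simp
    rw [hlen]
    have hflo : PySem.Int.floordiv (((Nat.digits 10 (N - 1).toNat).length : Nat) : Int) 2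
        = (((Nat.digits 10 (N - 1).toNat).length / 2 : Nat) : Int) := by
      have := PySem.Int.floordiv_natCast (Nat.digits 10 (N - 1).toNat).length 2
      exact_mod_cast this
    rw [hflo, loop_inv N ((Nat.digits 10 (N - 1).toNat).length / 2)]
    have hND : (N - 1).toNat < 10 ^ (Nat.digits 10 (N - 1).toNat).length :=
      Nat.lt_base_pow_length_digits (by norm_num)
    have hD10 : (Nat.digits 10 (N - 1).toNat).length ≤ 10 := by
      by_contra hc
      have h1 : (10:Nat) ^ 11 ≤ 10 ^ (Nat.digits 10 (N - 1).toNat).length :=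
        Nat.pow_le_pow_right (by norm_num) (by omega)
      have h2 := Nat.base_pow_length_digits_le 10 (N - 1).toNat (by norm_num) (by omega)
      have h4 : (10:Nat) ^ 11 = 100000000000 := by norm_num
      omega
    have hempty : ∀ j : Nat, (Nat.digits 10 (N - 1).toNat).length / 2 ≤ j →
        ((halvesL j).map fun h => pvMirror h ((j:Int) + 1)).filter (· < N) = [] := by
      intro j hj
      apply List.filter_eq_nil_iff.mpr
      intro x hx
      have hb := (pals_mem_bounds hx).1
      have hpow : (10:Nat) ^ (Nat.digits 10 (N - 1).toNat).length ≤ 10 ^ (2 * j + 1) :=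
        Nat.pow_le_pow_right (by norm_num) (by omega)
      have c1 : ((10 ^ (Nat.digits 10 (N - 1).toNat).length : Nat) : Int)
          ≤ ((10 ^ (2 * j + 1) : Nat) : Int) := by exact_mod_cast hpow
      have c2 : N - 1 < ((10 ^ (Nat.digits 10 (N - 1).toNat).length : Nat) : Int) := by
        have := hND
        omega
      simp only [decide_eq_true_eq]
      omega
    unfold pvCanon
    exact (flatMap_range_extend _ ((Nat.digits 10 (N - 1).toNat).length / 2) 5
      (by omega) hempty).symm

-- ===== VERDICT (by name: the statement is the Claim_ definition above) =====
theorem list_numbers_spec : Claim_equal_list_numbers := by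
  intro N hN
  unfold Spec_list_numbers
  rw [listA_eq N hN, listB_eq N hN]
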